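-- pv_equiv track=rewrite | github.com/diegorandolp/2025-1 | Competitiva/s7_2.py | solve
-- ===== SOURCE A (Python) =====
-- import heapq
--
-- def solve(n, t, vpt):
--     tot = 0
--     cands = []
--     for i in range(t-1, -1, -1):
--         if len(vpt[i]) != 0:
--             for m in vpt[i]:
--                 heapq.heappush(cands, -m)
--             if len(cands) != 0:
--                 tot += -heapq.heappop(cands)
--     return tot
-- ===== SOURCE B (Python) =====
-- def solve(n, t, vpt):
--     # same greedy total, but with a plain candidate pool + builtin max/remove
--     # instead of a negated-value heap and index arithmetic
--     tot = 0
--     pool = []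
--     for items in reversed(vpt[:max(t, 0)]):
--         if items:
--             pool += items
--             best = max(pool)
--             tot += best
--             pool.remove(best)
--     return tot
-- ===== Notes on version B (the rewrite author's own statement) =====
-- stated objective: simpler
-- what changed: Replaces the negated-value heapq priority queue and the index countdown loop with a direct iteration over reversed(vpt[:max(t,0)]) keeping a plain candidate pool from which builtin max() is taken and removed each step.
import Mathlib
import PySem

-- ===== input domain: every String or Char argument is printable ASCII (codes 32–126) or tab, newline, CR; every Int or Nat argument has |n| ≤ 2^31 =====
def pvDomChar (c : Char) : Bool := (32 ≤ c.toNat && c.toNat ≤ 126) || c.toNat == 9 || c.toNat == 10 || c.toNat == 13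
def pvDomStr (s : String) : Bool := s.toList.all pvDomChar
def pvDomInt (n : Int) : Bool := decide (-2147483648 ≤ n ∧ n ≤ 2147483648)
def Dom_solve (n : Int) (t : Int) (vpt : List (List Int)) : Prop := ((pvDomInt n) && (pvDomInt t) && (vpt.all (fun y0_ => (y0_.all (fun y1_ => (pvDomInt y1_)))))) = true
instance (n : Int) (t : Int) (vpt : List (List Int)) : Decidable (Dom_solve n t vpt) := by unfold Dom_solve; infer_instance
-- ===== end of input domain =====

-- B drops the heapq priority queue for a plain pool with builtin max()/remove(): simpler, not faster.

-- ===== PORT A =====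
-- heapq is ported by its contract: the heap list is kept sorted ascending, heappush is an
-- ordered insert, heappop returns the head.  This is exact here because every value A pops
-- depends only on the multiset of Ints stored in the heap (pop returns its minimum).
def heappush (h : List Int) (x : Int) : List Int := List.orderedInsert (· ≤ ·) x h

def stepA (st : Int × List Int) (l : List Int) : Int × List Int :=
  if l.length ≠ 0 then
    let cands := l.foldl (fun c m => heappush c (-m)) st.2
    if cands.length ≠ 0 then (st.1 + -(cands.headD 0), cands.tail)
    else (st.1, cands)
  else st

def solve (n : Int) (t : Int) (vpt : List (List Int)) : Int :=
  ((PySem.List.pyRange (t - 1) (-1) (-1)).foldl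
    (fun st i => stepA st (PySem.List.pyGetD vpt i [])) ((0 : Int), ([] : List Int))).1

-- ===== PORT B =====
def stepB (st : Int × List Int) (items : List Int) : Int × List Int :=
  if items ≠ [] then
    let pool := st.2 ++ items
    let best := (PySem.List.max? pool (fun x => x)).getD 0
    (st.1 + best, (PySem.List.remove? pool best).getD pool)
  else st

def solve_alt (n : Int) (t : Int) (vpt : List (List Int)) : Int :=
  ((PySem.List.slice vpt none (some (max t 0))).reverse.foldl
    stepB ((0 : Int), ([] : List Int))).1

-- ===== PRECONDITION & SPEC =====
-- A evaluates vpt[i] for i = t-1 … 0, so it raises IndexError iff t > len(vpt).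
def Pre_solve (n : Int) (t : Int) (vpt : List (List Int)) : Prop := t ≤ (vpt.length : Int)
instance (n : Int) (t : Int) (vpt : List (List Int)) : Decidable (Pre_solve n t vpt) := by
  unfold Pre_solve; infer_instance
def pvWitness_solve : Int × Int × List (List Int) := (0, 2, [[1], [2, 3]])

def Spec_solve (n : Int) (t : Int) (vpt : List (List Int)) (out : Int) : Prop := out = solve_alt n t vpt
instance (n : Int) (t : Int) (vpt : List (List Int)) (out : Int) : Decidable (Spec_solve n t vpt out) := by unfold Spec_solve; infer_instance

-- ===== CLAIM (what is proved, stated in full; the proofs are below) =====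
def Claim_equal_solve : Prop := ∀ (n : Int) (t : Int) (vpt : List (List Int)), Dom_solve n t vpt → Pre_solve n t vpt → Spec_solve n t vpt (solve n t vpt)

-- ===== LEMMAS AND PROOFS =====

-- The relation kept between A's state (total, heap list of negated values, sorted ascending)
-- and B's state (total, plain pool of values).
def ABRel (a b : Int × List Int) : Prop :=
  a.1 = b.1 ∧ (a.2.map (fun x => -x)).Perm b.2 ∧ a.2.Pairwise (· ≤ ·)

lemma pushAll_perm (l c : List Int) :
    (l.foldl (fun c m => heappush c (-m)) c).Perm (l.map (fun m => -m) ++ c) := by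
  induction l generalizing c with
  | nil => simp
  | cons m ls ih =>
    simp only [List.foldl_cons, List.map_cons, List.cons_append]
    refine ((ih (heappush c (-m))).trans ?_)
    refine (List.Perm.append_left _ (List.perm_orderedInsert _ _ _)).trans ?_
    exact List.perm_middle

lemma pushAll_sorted (l c : List Int) (hc : c.Pairwise (· ≤ ·)) :
    (l.foldl (fun c m => heappush c (-m)) c).Pairwise (· ≤ ·) := by
  induction l generalizing c with
  | nil => exact hc
  | cons m ls ih =>
    exact ih _ (List.Pairwise.orderedInsert _ _ hc)

lemma step_rel (a b : Int × List Int) (l : List Int) (h : ABRel a b) :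
    ABRel (stepA a l) (stepB b l) := by
  obtain ⟨htot, hperm, hsort⟩ := h
  by_cases hl : l = []
  · simp [stepA, stepB, hl]; exact ⟨htot, hperm, hsort⟩
  · have hlen : l.length ≠ 0 := by simpa using hl
    set cands := l.foldl (fun c m => heappush c (-m)) a.2 with hcands
    have hcp : cands.Perm (l.map (fun m => -m) ++ a.2) := pushAll_perm l a.2
    have hcs : cands.Pairwise (· ≤ ·) := pushAll_sorted l a.2 hsort
    have hcne : cands ≠ [] := by
      intro h0
      have := hcp.length_eq
      rw [h0] at this
      simp at this
      omega
    obtain ⟨hd, tl, hct⟩ := List.exists_cons_of_ne_nil hcne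
    set pool := b.2 ++ l with hpool
    have hpoolperm : (cands.map (fun x => -x)).Perm pool := by
      refine (hcp.map _).trans ?_
      have hll : (l.map (fun m => -m)).map (fun x => -x) = l := by
        simp
      rw [List.map_append, hll]
      exact List.perm_append_comm.trans (hperm.append_right l)
    have hpoolne : pool ≠ [] := by simp [hpool, hl]
    obtain ⟨m, hm⟩ : ∃ m, PySem.List.max? pool (fun x => x) = some m := by
      cases hmx : PySem.List.max? pool (fun x => x) with
      | none => exact absurd ((PySem.List.max?_eq_none_iff _ _).mp hmx) hpoolne
      | some m => exact ⟨m, rfl⟩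
    have hmmem : m ∈ pool := PySem.List.max?_mem hm
    have hmmax : ∀ y ∈ pool, y ≤ m := fun y hy => PySem.List.max?_isMax hm y hy
    have hheadmem : -hd ∈ pool := by
      refine hpoolperm.mem_iff.mp ?_
      rw [hct]; simp
    have hhd_min : ∀ y ∈ tl, hd ≤ y := by
      rw [hct] at hcs
      exact (List.pairwise_cons.mp hcs).1
    have hbest : -hd = m := by
      have h1 : -hd ≤ m := hmmax _ hheadmem
      have h2 : m ≤ -hd := by
        have : m ∈ cands.map (fun x => -x) := hpoolperm.mem_iff.mpr hmmem
        obtain ⟨x, hx, hxm⟩ := List.mem_map.mp this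
        rw [hct] at hx
        rcases List.mem_cons.mp hx with h | h
        · omega
        · have := hhd_min _ h; omega
      omega
    have hrem : (PySem.List.remove? pool m).getD pool = pool.erase m := by
      rw [PySem.List.remove?_eq_some_erase pool m hmmem]; rfl
    have htail : (tl.map (fun x => -x)).Perm (pool.erase m) := by
      have := hpoolperm.erase m
      rw [hct] at this
      simp only [List.map_cons, hbest] at this
      rwa [List.erase_cons_head] at this
    have hA : stepA a l = (a.1 + -hd, tl) := by
      simp only [stepA, ← hcands]
      rw [if_pos hlen, if_pos (by rw [hct]; simp)]
      rw [hct]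
      simp
    have hB : stepB b l = (b.1 + m, pool.erase m) := by
      simp only [stepB, ← hpool]
      rw [if_pos hl]
      simp [hm, hrem]
    rw [hA, hB]
    refine ⟨by simp [htot, hbest], by simpa using htail, ?_⟩
    rw [hct] at hcs
    exact (List.pairwise_cons.mp hcs).2

lemma foldl_rel (L : List (List Int)) (a b : Int × List Int) (h : ABRel a b) :
    ABRel (L.foldl stepA a) (L.foldl stepB b) := by
  induction L generalizing a b with
  | nil => exact h
  | cons l ls ih => exact ih _ _ (step_rel a b l h)

lemma map_pyGetD_range_eq_take (vpt : List (List Int)) (k : Nat) (hk : k ≤ vpt.length) :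
    (PySem.List.pyRange 0 (k : Int) 1).map (fun i => PySem.List.pyGetD vpt i []) = vpt.take k := by
  induction k with
  | zero => simp
  | succ k ih =>
    have hk' : k ≤ vpt.length := Nat.le_of_succ_le hk
    have hsplit : PySem.List.pyRange 0 ((k : Int) + 1) 1
        = PySem.List.pyRange 0 (k : Int) 1 ++ [(k : Int)] :=
      PySem.List.pyRange_one_succ_right (by positivity)
    have hcast : ((k + 1 : Nat) : Int) = (k : Int) + 1 := by push_cast; ring
    rw [hcast, hsplit, List.map_append, ih hk']
    have hget : PySem.List.pyGetD vpt ((k : Int)) [] = vpt[k]'(by omega) := by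
      rw [PySem.List.pyGetD_eq_getElem vpt [] (by positivity) (by exact_mod_cast hk)]
      simp
    rw [List.take_add_one]
    simp [hget, List.getElem?_eq_getElem (by omega : k < vpt.length)]

lemma lists_eq (t : Int) (vpt : List (List Int)) (hpre : t ≤ (vpt.length : Int)) :
    (PySem.List.pyRange (t - 1) (-1) (-1)).map (fun i => PySem.List.pyGetD vpt i [])
      = (PySem.List.slice vpt none (some (max t 0))).reverse := by
  rw [PySem.List.slice_to vpt (le_max_right t 0)]
  have hr : PySem.List.pyRange (t - 1) (-1) (-1)
      = (PySem.List.pyRange 0 t 1).reverse := by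
    rw [PySem.List.pyRange_neg_one_eq_reverse]
    norm_num
  rw [hr, List.map_reverse]
  congr 1
  by_cases ht : t ≤ 0
  · have h1 : PySem.List.pyRange 0 t 1 = [] := PySem.List.pyRange_one_eq_nil ht
    have h2 : (max t 0).toNat = 0 := by omega
    simp [h1, h2]
  · have h2 : (max t 0) = t := by omega
    have h3 : ((t.toNat : Nat) : Int) = t := by omega
    rw [h2, ← h3, map_pyGetD_range_eq_take vpt t.toNat (by omega)]
    simp
    omega

-- ===== VERDICT (by name: the statement is the Claim_ definition above) =====
theorem solve_spec : Claim_equal_solve := by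
  intro n t vpt _ hpre
  unfold Spec_solve solve solve_alt
  rw [← List.foldl_map (f := fun i => PySem.List.pyGetD vpt i []) (g := stepA)]
  rw [lists_eq t vpt hpre]
  exact (foldl_rel _ (0, []) (0, []) ⟨rfl, by simp, by simp⟩).1
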